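-- pv_equiv track=rewrite | github.com/Pridexs/dit | security/rsa/src/numbers.py | blocks2numList
-- ===== SOURCE A (Python) =====
-- import copy
--
-- def blocks2numList(blocks, n):
--     """inverse function of numList2blocks."""
--     toProcess = copy.copy(blocks)
--     returnList = []
--     for numBlock in toProcess:
--         inner = []
--         for i in range(0, n):
--             inner.append(numBlock % 256)
--             numBlock >>= 8
--         inner.reverse()
--         returnList.extend(inner)
--     return returnList
-- ===== SOURCE B (Python) =====
-- def blocks2numList(blocks, n):
--     """inverse function of numList2blocks."""
--     if n <= 0:
--         return []
--     size = 1 << (8 * n)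
--     out = []
--     for block in blocks:
--         out.extend((block % size).to_bytes(n, 'big'))
--     return out
-- ===== Notes on version B (the rewrite author's own statement) =====
-- stated objective: idiomatic
-- what changed: Replaces A's per-block inner loop of n shift-and-mask steps plus a list reverse by reducing each block mod 2^(8n) once and emitting its big-endian bytes directly with int.to_bytes.
import Mathlib
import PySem

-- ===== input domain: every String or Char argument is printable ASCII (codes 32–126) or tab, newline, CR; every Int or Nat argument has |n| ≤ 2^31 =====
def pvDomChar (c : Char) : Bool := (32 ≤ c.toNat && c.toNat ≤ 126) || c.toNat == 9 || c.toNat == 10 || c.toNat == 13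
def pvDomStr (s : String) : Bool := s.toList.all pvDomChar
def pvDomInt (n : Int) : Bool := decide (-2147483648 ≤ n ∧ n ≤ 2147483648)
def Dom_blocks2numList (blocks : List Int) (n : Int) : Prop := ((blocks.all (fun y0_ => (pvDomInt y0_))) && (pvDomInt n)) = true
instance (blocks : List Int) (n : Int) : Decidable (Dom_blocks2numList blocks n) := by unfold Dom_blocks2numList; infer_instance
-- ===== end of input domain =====

-- B replaces A's per-block shift-and-mask loop plus reverse by a single reduction mod 2^(8n)
-- followed by a direct big-endian byte expansion (int.to_bytes in Python): idiomatic, same cost class.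

-- ===== PORT A =====
-- for each block: n iterations of (append numBlock % 256; numBlock >>= 8), then reverse, then extend
def blocks2numList (blocks : List Int) (n : Int) : List Int :=
  let toProcess := blocks  -- copy.copy(blocks); never mutated
  toProcess.foldl (fun returnList numBlock =>
    let st := (PySem.List.pyRange 0 n 1).foldl
      (fun (st : List Int × Int) _ => (st.1 ++ [PySem.Int.mod st.2 256], st.2 >>> (8:Nat)))
      (([] : List Int), numBlock)
    returnList ++ st.1.reverse) []

-- ===== PORT B =====
-- big-endian bytes of v on k bytes; port of Python's (v).to_bytes(k, 'big') for 0 ≤ v < 256^k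
def toBytesBig : Nat → Int → List Int
  | 0, _ => []
  | k+1, v => toBytesBig k (PySem.Int.floordiv v 256) ++ [PySem.Int.mod v 256]

def blocks2numList_alt (blocks : List Int) (n : Int) : List Int :=
  if n ≤ 0 then []
  else
    let size : Int := (1 : Int) <<< (8 * n).toNat
    blocks.foldl (fun out block => out ++ toBytesBig n.toNat (PySem.Int.mod block size)) []

-- ===== PRECONDITION & SPEC =====
def Spec_blocks2numList (blocks : List Int) (n : Int) (out : List Int) : Prop := out = blocks2numList_alt blocks n
instance (blocks : List Int) (n : Int) (out : List Int) : Decidable (Spec_blocks2numList blocks n out) := by unfold Spec_blocks2numList; infer_instance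

-- ===== CLAIM (what is proved, stated in full; the proofs are below) =====
def Claim_equal_blocks2numList : Prop := ∀ (blocks : List Int) (n : Int), Dom_blocks2numList blocks n → Spec_blocks2numList blocks n (blocks2numList blocks n)

-- ===== LEMMAS AND PROOFS =====

-- little-endian byte digits, the semantic content of A's inner loop
def little : Nat → Int → List Int
  | 0, _ => []
  | k+1, b => PySem.Int.mod b 256 :: little k (b >>> (8:Nat))

-- A's inner fold ignores the range element: it is k iterations of one step
theorem foldl_ignore_iterate (l : List Int) (s : List Int × Int) :
    l.foldl (fun (st : List Int × Int) _ => (st.1 ++ [PySem.Int.mod st.2 256], st.2 >>> (8:Nat))) s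
    = (fun (st : List Int × Int) => (st.1 ++ [PySem.Int.mod st.2 256], st.2 >>> (8:Nat)))^[l.length] s := by
  induction l generalizing s with
  | nil => rfl
  | cons x xs ih =>
    rw [List.foldl_cons, List.length_cons, Function.iterate_succ_apply]
    exact ih _

theorem iterate_eq_little (k : Nat) : ∀ (acc : List Int) (b : Int),
    (fun (st : List Int × Int) => (st.1 ++ [PySem.Int.mod st.2 256], st.2 >>> (8:Nat)))^[k] (acc, b)
    = (acc ++ little k b, b >>> (8*k)) := by
  induction k with
  | zero => intro acc b; simp [little]
  | succ k ih =>
    intro acc b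
    rw [Function.iterate_succ_apply, ih]
    have hsh : (b >>> (8:Nat)) >>> (8*k) = b >>> (8*(k+1)) := by
      simp [Int.shiftRight_eq_div_pow, Int.ediv_ediv_eq_ediv_mul, pow_add, pow_mul, mul_comm]
      ring_nf
    simp [little, hsh]

theorem shiftR8 (b : Int) : b >>> (8:Nat) = b / 256 := by
  have := Int.shiftRight_eq_div_pow b 8; simpa using this

-- (b % (256*T)) / 256 ≡ b / 256  (mod T), and that quotient already lies in [0, T)
theorem mod_div_shift (T b : Int) (hT : 0 < T) :
    (b % (256*T)) / 256 = (b / 256) % T := by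
  have h256T : (0:Int) < 256*T := by positivity
  have hb := Int.emod_nonneg b (ne_of_gt h256T)
  have hub := Int.emod_lt_of_pos b h256T
  have hdecomp : b = b % (256*T) + (T * (b / (256*T))) * 256 := by
    have := Int.ediv_add_emod b (256*T); ring_nf; ring_nf at this; omega
  have hq : b / 256 = (b % (256*T)) / 256 + T * (b / (256*T)) := by
    conv_lhs => rw [hdecomp]
    exact Int.add_mul_ediv_right _ _ (by norm_num)
  have hbound : 0 ≤ (b % (256*T)) / 256 ∧ (b % (256*T)) / 256 < T := by
    constructor
    · exact Int.ediv_nonneg hb (by norm_num)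
    · have : b % (256*T) < T * 256 := by linarith [hub]
      exact Int.ediv_lt_of_lt_mul (by norm_num) (by linarith)
  rw [hq, Int.add_mul_emod_self_left, Int.emod_eq_of_lt hbound.1 hbound.2]

theorem toBytesBig_congr (k : Nat) : ∀ v w : Int, v % (2^(8*k) : Int) = w % (2^(8*k)) →
    toBytesBig k v = toBytesBig k w := by
  induction k with
  | zero => intro v w _; rfl
  | succ k ih =>
    intro v w h
    have hT : (0:Int) < 2^(8*k) := by positivity
    have hpow : (2:Int)^(8*(k+1)) = 256 * 2^(8*k) := by
      rw [mul_add, pow_add]; norm_num [mul_comm]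
    rw [hpow] at h
    have hdvd : (256:Int) ∣ 256 * 2^(8*k) := ⟨_, rfl⟩
    have hmod : v % 256 = w % 256 := by
      rw [← Int.emod_emod_of_dvd v hdvd, ← Int.emod_emod_of_dvd w hdvd, h]
    have hdiv : (v/256) % (2^(8*k) : Int) = (w/256) % (2^(8*k)) := by
      rw [← mod_div_shift _ v hT, ← mod_div_shift _ w hT, h]
    have h256 : (0:Int) < 256 := by norm_num
    simp only [toBytesBig, PySem.Int.mod_eq_emod_of_pos h256,
      PySem.Int.floordiv_eq_ediv_of_pos h256, hmod]
    rw [ih _ _ hdiv]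

theorem little_reverse (k : Nat) : ∀ b : Int,
    (little k b).reverse = toBytesBig k (b % (2^(8*k) : Int)) := by
  induction k with
  | zero => intro b; rfl
  | succ k ih =>
    intro b
    have hT : (0:Int) < 2^(8*k) := by positivity
    have hpow : (2:Int)^(8*(k+1)) = 256 * 2^(8*k) := by
      rw [mul_add, pow_add]; norm_num [mul_comm]
    have h256 : (0:Int) < 256 := by norm_num
    have hdvd : (256:Int) ∣ 256 * 2^(8*k) := ⟨_, rfl⟩
    have hmod : (b % (256 * 2^(8*k))) % 256 = b % 256 := Int.emod_emod_of_dvd b hdvd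
    have hdiv : ((b % (256 * 2^(8*k))) / 256) % (2^(8*k) : Int) = ((b >>> (8:Nat)) % (2^(8*k) : Int)) % (2^(8*k)) := by
      rw [mod_div_shift _ b hT, shiftR8, Int.emod_emod_of_dvd _ dvd_rfl]
    calc (little (k+1) b).reverse
        = (little k (b >>> (8:Nat))).reverse ++ [PySem.Int.mod b 256] := by simp [little]
      _ = toBytesBig k ((b >>> (8:Nat)) % (2^(8*k) : Int)) ++ [PySem.Int.mod b 256] := by rw [ih]
      _ = toBytesBig (k+1) (b % (2^(8*(k+1)) : Int)) := by
          simp only [toBytesBig, hpow, PySem.Int.mod_eq_emod_of_pos h256,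
            PySem.Int.floordiv_eq_ediv_of_pos h256, hmod]
          rw [toBytesBig_congr k _ _ hdiv.symm]

-- per-block: A's inner loop (reversed) is B's byte expansion
theorem block_eq (n : Int) (hn : 0 < n) (b : Int) :
    (((PySem.List.pyRange 0 n 1).foldl
      (fun (st : List Int × Int) _ => (st.1 ++ [PySem.Int.mod st.2 256], st.2 >>> (8:Nat)))
      (([] : List Int), b)).1).reverse
    = toBytesBig n.toNat (PySem.Int.mod b ((1 : Int) <<< (8 * n).toNat)) := by
  rw [foldl_ignore_iterate]
  have hlen : (PySem.List.pyRange 0 n 1).length = n.toNat := by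
    rw [PySem.List.length_pyRange_one]; omega
  rw [hlen, iterate_eq_little]
  show (little n.toNat b).reverse = _
  rw [little_reverse]
  have hsz : ((1:Int) <<< (8*n).toNat) = (2:Int)^(8*n.toNat) := by
    rw [Int.shiftLeft_eq, one_mul]
    congr 1
    omega
  have hpos : (0:Int) < 2^(8*n.toNat) := by positivity
  rw [hsz, PySem.Int.mod_eq_emod_of_pos hpos]

theorem foldl_fun_congr {f g : List Int → Int → List Int} (h : ∀ a x, f a x = g a x) :
    ∀ (l : List Int) (i : List Int), l.foldl f i = l.foldl g i := by
  intro l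
  induction l with
  | nil => intro i; rfl
  | cons x xs ih => intro i; rw [List.foldl_cons, List.foldl_cons, h, ih]

theorem foldl_nil_append (blocks : List Int) :
    blocks.foldl (fun (acc : List Int) (_ : Int) => acc ++ ([] : List Int)) [] = [] := by
  induction blocks with
  | nil => rfl
  | cons x xs ih => simpa using ih

-- ===== VERDICT (by name: the statement is the Claim_ definition above) =====
theorem blocks2numList_spec : Claim_equal_blocks2numList := by
  intro blocks n _
  unfold Spec_blocks2numList blocks2numList blocks2numList_alt
  by_cases hn : n ≤ 0
  · simp only [if_pos hn]
    have hnil : PySem.List.pyRange 0 n 1 = [] := PySem.List.pyRange_one_eq_nil hn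
    simp only [hnil, List.foldl_nil, List.reverse_nil]
    exact foldl_nil_append blocks
  · simp only [if_neg hn]
    have hn' : 0 < n := by omega
    apply foldl_fun_congr
    intro acc b
    rw [block_eq n hn' b]
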